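-- pv_equiv track=rewrite | github.com/jonathan-politzki/stanford-law-hackathon | diff_utils.py | identify_linked_edits
-- ===== SOURCE A (Python) =====
-- def identify_linked_edits(diffs, max_distance=2, context_size=3):
--     linked_edits = []
--     current_group = []
--     last_edit_index = -1
--
--     for i, (op, text, style, indent) in enumerate(diffs):
--         if op in ['added', 'removed']:
--             if not current_group or i - last_edit_index <= max_distance:
--                 # Check context similarity
--                 context_similar = check_context_similarity(diffs, i, last_edit_index, context_size)
--                 if context_similar or not current_group:
--                     current_group.append((i, op, text, style, indent))
--                 else:
--                     linked_edits.append(current_group)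
--                     current_group = [(i, op, text, style, indent)]
--             else:
--                 linked_edits.append(current_group)
--                 current_group = [(i, op, text, style, indent)]
--             last_edit_index = i
--         elif current_group:
--             linked_edits.append(current_group)
--             current_group = []
--
--     if current_group:
--         linked_edits.append(current_group)
--
--     return linked_edits
--
-- def check_context_similarity(diffs, current_index, last_index, context_size):
--     if last_index == -1:
--         return True
--
--     current_context = get_context(diffs, current_index, context_size)
--     last_context = get_context(diffs, last_index, context_size)
--
--     return are_contexts_similar(current_context, last_context)
--
-- def get_context(diffs, index, size):
--     start = max(0, index - size)
--     end = min(len(diffs), index + size + 1)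
--     return diffs[start:end]
--
-- def are_contexts_similar(context1, context2):
--     # Implement a basic similarity check
--     text1 = ' '.join(item[1] for item in context1)
--     text2 = ' '.join(item[1] for item in context2)
--     return text1.lower() == text2.lower()
-- ===== SOURCE B (Python) =====
-- def identify_linked_edits(diffs, max_distance=2, context_size=3):
--     # Phase 1: collect maximal runs of consecutive edits, each edit with its index.
--     runs = []
--     run = []
--     for i, (op, text, style, indent) in enumerate(diffs):
--         if op in ('added', 'removed'):
--             run.append((i, op, text, style, indent))
--         else:
--             if run:
--                 runs.append(run)
--             run = []
--     if run:
--         runs.append(run)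
--     # Phase 2: split each run into groups; adjacent edits are 1 apart, so a new
--     # group starts when 1 > max_distance or the surrounding contexts differ.
--     result = []
--     for run in runs:
--         group = [run[0]]
--         for prev, cur in zip(run, run[1:]):
--             if max_distance >= 1 and check_context_similarity(diffs, cur[0], prev[0], context_size):
--                 group.append(cur)
--             else:
--                 result.append(group)
--                 group = [cur]
--         result.append(group)
--     return result
--
-- def check_context_similarity(diffs, current_index, last_index, context_size):
--     if last_index == -1:
--         return True
--     current_context = get_context(diffs, current_index, context_size)
--     last_context = get_context(diffs, last_index, context_size)
--     return are_contexts_similar(current_context, last_context)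
--
-- def get_context(diffs, index, size):
--     start = max(0, index - size)
--     end = min(len(diffs), index + size + 1)
--     return diffs[start:end]
--
-- def are_contexts_similar(context1, context2):
--     text1 = ' '.join(item[1] for item in context1)
--     text2 = ' '.join(item[1] for item in context2)
--     return text1.lower() == text2.lower()
-- ===== Notes on version B (the rewrite author's own statement) =====
-- stated objective: alternative
-- what changed: Replaces A's single combined pass with (linked_edits, current_group, last_edit_index) state by a two-phase decomposition: first collect maximal runs of consecutive edits, then split each run at context-dissimilarity boundaries; the distance test, which inside a run always compares 1 with max_distance, becomes the explicit condition max_distance >= 1.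
import Mathlib
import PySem

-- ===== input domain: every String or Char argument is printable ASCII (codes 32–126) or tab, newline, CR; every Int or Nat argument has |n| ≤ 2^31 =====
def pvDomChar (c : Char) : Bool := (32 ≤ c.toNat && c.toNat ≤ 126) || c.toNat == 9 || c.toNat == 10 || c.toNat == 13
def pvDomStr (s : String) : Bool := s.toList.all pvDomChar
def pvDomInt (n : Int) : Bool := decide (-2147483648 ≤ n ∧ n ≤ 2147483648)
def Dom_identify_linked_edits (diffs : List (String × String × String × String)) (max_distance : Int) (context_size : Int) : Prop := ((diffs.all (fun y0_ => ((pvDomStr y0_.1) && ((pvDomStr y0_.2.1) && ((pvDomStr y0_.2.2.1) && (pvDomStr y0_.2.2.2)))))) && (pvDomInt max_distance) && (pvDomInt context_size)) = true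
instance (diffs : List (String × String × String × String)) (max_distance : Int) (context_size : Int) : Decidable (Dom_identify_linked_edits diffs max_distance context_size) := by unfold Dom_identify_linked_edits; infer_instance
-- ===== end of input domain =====

-- B replaces A's single combined pass (group/last-index state machine) by a two-phase
-- run-then-split decomposition: collect maximal runs of consecutive edits, then split each
-- run at context-dissimilarity boundaries (objective: alternative decomposition, same cost).

-- ===== PORT A =====
-- shared module helpers (used verbatim by both Pythons)
def get_context (diffs : List (String × String × String × String)) (index size : Int) : List (String × String × String × String) :=
  let start := max 0 (index - size)
  let stop := min (diffs.length : Int) (index + size + 1)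
  PySem.List.slice diffs (some start) (some stop)

def are_contexts_similar (context1 context2 : List (String × String × String × String)) : Bool :=
  let text1 := PySem.Str.join " " (context1.map (fun item => item.2.1))
  let text2 := PySem.Str.join " " (context2.map (fun item => item.2.1))
  PySem.Str.lower text1 == PySem.Str.lower text2

def check_context_similarity (diffs : List (String × String × String × String)) (current_index last_index context_size : Int) : Bool :=
  if last_index == -1 then true
  else
    let current_context := get_context diffs current_index context_size
    let last_context := get_context diffs last_index context_size
    are_contexts_similar current_context last_context

-- A's loop body (one step of the single combined pass)
def pvStepA (diffs : List (String × String × String × String)) (max_distance context_size : Int)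
    (s : List (List (Int × String × String × String × String)) × List (Int × String × String × String × String) × Int)
    (p : Int × String × String × String × String) :
    List (List (Int × String × String × String × String)) × List (Int × String × String × String × String) × Int :=
  let (linked_edits, current_group, last_edit_index) := s
  let (i, op, text, style, indent) := p
  if op == "added" || op == "removed" then
    if current_group.isEmpty || decide (i - last_edit_index ≤ max_distance) then
      let context_similar := check_context_similarity diffs i last_edit_index context_size
      if context_similar || current_group.isEmpty then
        (linked_edits, current_group ++ [(i, op, text, style, indent)], i)
      else
        (linked_edits ++ [current_group], [(i, op, text, style, indent)], i)
    else
      (linked_edits ++ [current_group], [(i, op, text, style, indent)], i)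
  else if !current_group.isEmpty then
    (linked_edits ++ [current_group], [], last_edit_index)
  else s

-- A: one pass with (linked_edits, current_group, last_edit_index) state
def identify_linked_edits (diffs : List (String × String × String × String)) (max_distance : Int) (context_size : Int) : List (List (Int × String × String × String × String)) :=
  let st := (PySem.List.enumerate diffs 0).foldl (pvStepA diffs max_distance context_size) ([], [], -1)
  if !st.2.1.isEmpty then st.1 ++ [st.2.1] else st.1

-- ===== PORT B =====
-- split one run of consecutive edits at dissimilar-context boundaries (the zip(run, run[1:]) walk)
def pvSplitGo (diffs : List (String × String × String × String)) (max_distance context_size : Int)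
    (prev : Int × String × String × String × String)
    (group : List (Int × String × String × String × String)) :
    List (Int × String × String × String × String) → List (List (Int × String × String × String × String))
  | [] => [group]
  | cur :: rest =>
    if decide (1 ≤ max_distance) && check_context_similarity diffs cur.1 prev.1 context_size then
      pvSplitGo diffs max_distance context_size cur (group ++ [cur]) rest
    else
      group :: pvSplitGo diffs max_distance context_size cur [cur] rest

def pvSplitRun (diffs : List (String × String × String × String)) (max_distance context_size : Int) :
    List (Int × String × String × String × String) → List (List (Int × String × String × String × String))
  | [] => []
  | r :: rest => pvSplitGo diffs max_distance context_size r [r] rest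

-- B's phase-1 loop body (run collector)
def pvStepB (s : List (List (Int × String × String × String × String)) × List (Int × String × String × String × String))
    (p : Int × String × String × String × String) :
    List (List (Int × String × String × String × String)) × List (Int × String × String × String × String) :=
  let (runs, run) := s
  let (i, op, text, style, indent) := p
  if op == "added" || op == "removed" then (runs, run ++ [(i, op, text, style, indent)])
  else if !run.isEmpty then (runs ++ [run], []) else (runs, [])

def identify_linked_edits_alt (diffs : List (String × String × String × String)) (max_distance : Int) (context_size : Int) : List (List (Int × String × String × String × String)) :=
  -- phase 1: maximal runs of consecutive edits, each edit with its index
  let st := (PySem.List.enumerate diffs 0).foldl pvStepB ([], [])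
  let runs := if !st.2.isEmpty then st.1 ++ [st.2] else st.1
  -- phase 2: split each run into linked groups
  runs.foldl (fun result run => result ++ pvSplitRun diffs max_distance context_size run) []

-- ===== PRECONDITION & SPEC =====
def Spec_identify_linked_edits (diffs : List (String × String × String × String)) (max_distance : Int) (context_size : Int) (out : List (List (Int × String × String × String × String))) : Prop := out = identify_linked_edits_alt diffs max_distance context_size
instance (diffs : List (String × String × String × String)) (max_distance : Int) (context_size : Int) (out : List (List (Int × String × String × String × String))) : Decidable (Spec_identify_linked_edits diffs max_distance context_size out) := by unfold Spec_identify_linked_edits; infer_instance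

-- ===== CLAIM (what is proved, stated in full; the proofs are below) =====
def Claim_equal_identify_linked_edits : Prop := ∀ (diffs : List (String × String × String × String)) (max_distance : Int) (context_size : Int), Dom_identify_linked_edits diffs max_distance context_size → Spec_identify_linked_edits diffs max_distance context_size (identify_linked_edits diffs max_distance context_size)

-- ===== LEMMAS AND PROOFS =====

-- common recursive description both ports are reduced to: walk the list at index n
-- carrying only the current group g (empty = not inside a run)
def pvGo (diffs : List (String × String × String × String)) (max_distance context_size : Int) :
    Int → List (String × String × String × String) → List (Int × String × String × String × String) → List (List (Int × String × String × String × String))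
  | _, [], g => if g.isEmpty then [] else [g]
  | n, d :: rest, g =>
    if d.1 == "added" || d.1 == "removed" then
      if g.isEmpty then pvGo diffs max_distance context_size (n+1) rest [(n, d)]
      else if decide (1 ≤ max_distance) && check_context_similarity diffs n (n-1) context_size then
        pvGo diffs max_distance context_size (n+1) rest (g ++ [(n, d)])
      else g :: pvGo diffs max_distance context_size (n+1) rest [(n, d)]
    else if g.isEmpty then pvGo diffs max_distance context_size (n+1) rest []
    else g :: pvGo diffs max_distance context_size (n+1) rest []

-- ===== A-side: the combined pass computes pvGo =====
theorem pvA_loop (diffs : List (String × String × String × String)) (md cs : Int) :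
    ∀ (l : List (String × String × String × String)) (n : Int)
      (acc : List (List (Int × String × String × String × String)))
      (cur : List (Int × String × String × String × String)) (last : Int),
      (cur ≠ [] → last = n - 1) →
      (let st := (PySem.List.enumerate l n).foldl (pvStepA diffs md cs) (acc, cur, last)
       if !st.2.1.isEmpty then st.1 ++ [st.2.1] else st.1)
        = acc ++ pvGo diffs md cs n l cur := by
  intro l
  induction l with
  | nil =>
    intro n acc cur last hinv
    cases cur <;> simp [PySem.List.enumerate_nil, pvGo]
  | cons d rest ih =>
    intro n acc cur last hinv
    obtain ⟨op, text, style, indent⟩ := d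
    rw [PySem.List.enumerate_cons]
    simp only [List.foldl_cons]
    by_cases hop : (op == "added" || op == "removed") = true
    · cases cur with
      | nil =>
        have hstep : pvStepA diffs md cs (acc, [], last) (n, op, text, style, indent)
             = (acc, [(n, op, text, style, indent)], n) := by
          simp [pvStepA, hop]
        rw [hstep, ih (n+1) acc [(n, op, text, style, indent)] n (fun _ => by ring)]
        simp [pvGo, hop]
      | cons c ct =>
        have hlast : last = n - 1 := hinv (by simp)
        subst hlast
        have h1 : n - (n - 1) = 1 := by ring
        by_cases hmd : (1:Int) ≤ md
        · by_cases hsim : check_context_similarity diffs n (n-1) cs = true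
          · have hstep : pvStepA diffs md cs (acc, c :: ct, n-1) (n, op, text, style, indent)
                 = (acc, (c :: ct) ++ [(n, op, text, style, indent)], n) := by
              simp [pvStepA, hop, h1, hmd, hsim]
            rw [hstep, ih (n+1) acc ((c :: ct) ++ [(n, op, text, style, indent)]) n (fun _ => by ring)]
            simp [pvGo, hop, hmd, hsim]
          · have hstep : pvStepA diffs md cs (acc, c :: ct, n-1) (n, op, text, style, indent)
                 = (acc ++ [c :: ct], [(n, op, text, style, indent)], n) := by
              simp [pvStepA, hop, h1, hmd, hsim]
            rw [hstep, ih (n+1) (acc ++ [c :: ct]) [(n, op, text, style, indent)] n (fun _ => by ring)]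
            simp [pvGo, hop, hmd, hsim]
        · have hstep : pvStepA diffs md cs (acc, c :: ct, n-1) (n, op, text, style, indent)
               = (acc ++ [c :: ct], [(n, op, text, style, indent)], n) := by
            simp [pvStepA, hop, h1, hmd]
          rw [hstep, ih (n+1) (acc ++ [c :: ct]) [(n, op, text, style, indent)] n (fun _ => by ring)]
          simp [pvGo, hop, hmd]
    · cases cur with
      | nil =>
        have hstep : pvStepA diffs md cs (acc, [], last) (n, op, text, style, indent)
             = (acc, [], last) := by
          simp [pvStepA, hop]
        rw [hstep, ih (n+1) acc [] last (by simp)]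
        simp [pvGo, hop]
      | cons c ct =>
        have hstep : pvStepA diffs md cs (acc, c :: ct, last) (n, op, text, style, indent)
             = (acc ++ [c :: ct], [], last) := by
          simp [pvStepA, hop]
        rw [hstep, ih (n+1) (acc ++ [c :: ct]) [] last (by simp)]
        simp [pvGo, hop]

theorem pvSplitGo_ne_nil (diffs : List (String × String × String × String)) (md cs : Int) :
    ∀ (l : List (Int × String × String × String × String)) (prev : Int × String × String × String × String)
      (g : List (Int × String × String × String × String)),
      pvSplitGo diffs md cs prev g l ≠ [] := by
  intro l
  induction l with
  | nil => intro prev g; simp [pvSplitGo]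
  | cons c rs ih =>
    intro prev g
    simp only [pvSplitGo]
    split
    · exact ih c (g ++ [c])
    · simp

theorem pvGetLast?_cons {T : Type} (l : List T) (a : T) :
    (a :: l).getLast? = some (l.getLastD a) := by
  induction l generalizing a <;> simp_all

theorem pvSplitGo_mem_ne_nil (diffs : List (String × String × String × String)) (md cs : Int) :
    ∀ (l : List (Int × String × String × String × String)) (prev : Int × String × String × String × String)
      (g : List (Int × String × String × String × String)), g ≠ [] →
      ∀ G ∈ pvSplitGo diffs md cs prev g l, G ≠ [] := by
  intro l
  induction l with
  | nil => intro prev g hg; simp [pvSplitGo, hg]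
  | cons c rs ih =>
    intro prev g hg G hG
    simp only [pvSplitGo] at hG
    split at hG
    · exact ih c (g ++ [c]) (by simp) G hG
    · rcases List.mem_cons.mp hG with h | h
      · simpa [h] using hg
      · exact ih c [c] (by simp) G h

theorem pvSplitGo_concat (diffs : List (String × String × String × String)) (md cs : Int) :
    ∀ (rest : List (Int × String × String × String × String))
      (prev x : Int × String × String × String × String)
      (g : List (Int × String × String × String × String)),
      pvSplitGo diffs md cs prev g (rest ++ [x]) =
        if decide (1 ≤ md) && check_context_similarity diffs x.1 ((rest.getLastD prev).1) cs then
          (pvSplitGo diffs md cs prev g rest).dropLast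
            ++ [(pvSplitGo diffs md cs prev g rest).getLastD [] ++ [x]]
        else pvSplitGo diffs md cs prev g rest ++ [[x]] := by
  intro rest
  induction rest with
  | nil =>
    intro prev x g
    simp only [List.nil_append, List.getLastD_nil, pvSplitGo]
    split <;> simp
  | cons c rs ih =>
    intro prev x g
    simp only [List.cons_append, pvSplitGo, List.getLastD_cons]
    split
    · exact ih c x (g ++ [c])
    · rw [ih c x [c]]
      obtain ⟨t, ts, hT⟩ := List.ne_nil_iff_exists_cons.mp (pvSplitGo_ne_nil diffs md cs rs c [c])
      split <;> simp [hT]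

-- ===== B-side: run-then-split computes pvGo =====
theorem pvB_loop (diffs : List (String × String × String × String)) (md cs : Int) :
    ∀ (l : List (String × String × String × String)) (n : Int)
      (R : List (List (Int × String × String × String × String)))
      (r : List (Int × String × String × String × String)),
      (∀ x, r.getLast? = some x → x.1 = n - 1) →
      (let st := (PySem.List.enumerate l n).foldl pvStepB (R, r)
       let runs := if !st.2.isEmpty then st.1 ++ [st.2] else st.1
       runs.foldl (fun result run => result ++ pvSplitRun diffs md cs run) [])
        = (R.foldl (fun result run => result ++ pvSplitRun diffs md cs run) [])
          ++ (pvSplitRun diffs md cs r).dropLast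
          ++ pvGo diffs md cs n l ((pvSplitRun diffs md cs r).getLastD []) := by
  intro l
  induction l with
  | nil =>
    intro n R r hinv
    simp only [PySem.List.enumerate_nil, List.foldl_nil]
    cases r with
    | nil => simp [pvSplitRun, pvGo]
    | cons r0 rt =>
      obtain ⟨Q, q, hP⟩ :=
        (List.eq_nil_or_concat' (pvSplitGo diffs md cs r0 [r0] rt)).resolve_left
          (pvSplitGo_ne_nil diffs md cs rt r0 [r0])
      have hq : q ≠ [] := pvSplitGo_mem_ne_nil diffs md cs rt r0 [r0] (by simp) q (by simp [hP])
      simp [pvSplitRun, pvGo, hP, hq, List.foldl_append]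
  | cons d rest ih =>
    intro n R r hinv
    obtain ⟨op, text, style, indent⟩ := d
    rw [PySem.List.enumerate_cons]
    simp only [List.foldl_cons]
    by_cases hop : (op == "added" || op == "removed") = true
    · have hstep : pvStepB (R, r) (n, op, text, style, indent)
           = (R, r ++ [(n, op, text, style, indent)]) := by simp [pvStepB, hop]
      rw [hstep, ih (n+1) R (r ++ [(n, op, text, style, indent)])
        (by intro y hy; rw [List.getLast?_concat] at hy; cases hy; ring)]
      cases r with
      | nil => simp [pvSplitRun, pvSplitGo, pvGo, hop]
      | cons r0 rt =>
        have hlastidx : (rt.getLastD r0).1 = n - 1 := by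
          apply hinv
          exact pvGetLast?_cons rt r0
        obtain ⟨Q, q, hP⟩ :=
          (List.eq_nil_or_concat' (pvSplitGo diffs md cs r0 [r0] rt)).resolve_left
            (pvSplitGo_ne_nil diffs md cs rt r0 [r0])
        have hq : q ≠ [] := pvSplitGo_mem_ne_nil diffs md cs rt r0 [r0] (by simp) q (by simp [hP])
        have hcat : (r0 :: rt) ++ [(n, op, text, style, indent)]
             = r0 :: (rt ++ [(n, op, text, style, indent)]) := by simp
        rw [hcat]
        simp only [pvSplitRun]
        rw [pvSplitGo_concat diffs md cs rt r0 (n, op, text, style, indent) [r0]]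
        simp only [hlastidx]
        by_cases hc : (decide (1 ≤ md) && check_context_similarity diffs n (n-1) cs) = true
        · simp [hc, hP, pvGo, hop, hq]
        · simp [hc, hP, pvGo, hop, hq, List.append_assoc]
    · cases r with
      | nil =>
        have hstep : pvStepB (R, []) (n, op, text, style, indent) = (R, []) := by
          simp [pvStepB, hop]
        rw [hstep, ih (n+1) R [] (by simp)]
        simp [pvSplitRun, pvGo, hop]
      | cons r0 rt =>
        have hstep : pvStepB (R, r0 :: rt) (n, op, text, style, indent)
             = (R ++ [r0 :: rt], []) := by simp [pvStepB, hop]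
        rw [hstep, ih (n+1) (R ++ [r0 :: rt]) [] (by simp)]
        obtain ⟨Q, q, hP⟩ :=
          (List.eq_nil_or_concat' (pvSplitGo diffs md cs r0 [r0] rt)).resolve_left
            (pvSplitGo_ne_nil diffs md cs rt r0 [r0])
        have hq : q ≠ [] := pvSplitGo_mem_ne_nil diffs md cs rt r0 [r0] (by simp) q (by simp [hP])
        simp [pvSplitRun, pvGo, hP, hq, hop, List.foldl_append, List.append_assoc]

-- ===== VERDICT (by name: the statement is the Claim_ definition above) =====
theorem identify_linked_edits_spec : Claim_equal_identify_linked_edits := by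
  intro diffs md cs _
  unfold Spec_identify_linked_edits identify_linked_edits identify_linked_edits_alt
  have hA := pvA_loop diffs md cs diffs 0 [] [] (-1) (by simp)
  have hB := pvB_loop diffs md cs diffs 0 [] [] (by simp)
  simp only at hA hB
  rw [hA, hB]
  simp [pvSplitRun]
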